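-- pv_equiv track=rewrite | github.com/KCCat/dnspod-httpdns-proxy | httpdns.py | cidrunique
-- ===== SOURCE A (Python) =====
-- def cidrunique (cidr):
--     tmp=[]
--     for x in cidr:
--         s=''
--         v=1
--         for i in x:
--             s=s+i
--             if s in cidr and s!=x:
--                 v=0
--                 break
--         if v:
--             tmp.append(x)
--     return {}.fromkeys(tmp)
-- ===== SOURCE B (Python) =====
-- def cidrunique(cidr):
--     keep = [x for x in cidr
--             if not any(y != x and y != '' and x.startswith(y) for y in cidr)]
--     return {}.fromkeys(keep)
-- ===== Notes on version B (the rewrite author's own statement) =====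
-- stated objective: simpler
-- what changed: Replaces A's inner grow-a-prefix-character-by-character loop with membership tests by a direct pairwise 'is y a non-empty proper prefix of x' scan (x.startswith(y)) over the list, collected in a comprehension.
import Mathlib
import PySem

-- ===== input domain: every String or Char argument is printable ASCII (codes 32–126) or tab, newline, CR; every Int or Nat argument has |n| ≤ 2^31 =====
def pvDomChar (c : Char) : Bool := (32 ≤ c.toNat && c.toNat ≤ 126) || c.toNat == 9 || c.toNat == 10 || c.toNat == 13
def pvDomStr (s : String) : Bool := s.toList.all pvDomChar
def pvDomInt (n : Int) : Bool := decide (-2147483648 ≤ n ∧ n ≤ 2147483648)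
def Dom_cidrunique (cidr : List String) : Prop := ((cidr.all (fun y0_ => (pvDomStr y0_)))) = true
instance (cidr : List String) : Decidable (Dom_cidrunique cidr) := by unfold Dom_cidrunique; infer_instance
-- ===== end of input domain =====

-- B replaces A's grow-a-prefix inner loop by a direct pairwise startswith scan (objective: simpler).

-- ===== PORT A =====
-- inner loop: for i in x: s=s+i; if s in cidr and s!=x: v=0; break
def cidruniqueInner (cidr : List String) (x : String) : List Char → String → Bool
  | [], _ => true
  | i :: rest, s =>
    let s2 := s.push i
    if s2 ∈ cidr ∧ s2 ≠ x then false
    else cidruniqueInner cidr x rest s2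

def cidrunique (cidr : List String) : List (String × Option Int) :=
  let tmp := cidr.foldl
    (fun tmp x => if cidruniqueInner cidr x x.toList "" then tmp ++ [x] else tmp) []
  -- {}.fromkeys(tmp): keys deduped keeping first occurrences, each mapped to None
  (PySem.List.dedup tmp).map (fun k => (k, (none : Option Int)))

-- ===== PORT B =====
def cidrunique_alt (cidr : List String) : List (String × Option Int) :=
  let keep := cidr.filter
    (fun x => ! cidr.any (fun y => (y != x) && (y != "") && PySem.Str.startswith x y))
  (PySem.List.dedup keep).map (fun k => (k, (none : Option Int)))

-- ===== PRECONDITION & SPEC =====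
def Spec_cidrunique (cidr : List String) (out : List (String × Option Int)) : Prop := out = cidrunique_alt cidr
instance (cidr : List String) (out : List (String × Option Int)) : Decidable (Spec_cidrunique cidr out) := by unfold Spec_cidrunique; infer_instance

-- ===== CLAIM (what is proved, stated in full; the proofs are below) =====
def Claim_equal_cidrunique : Prop := ∀ (cidr : List String), Dom_cidrunique cidr → Spec_cidrunique cidr (cidrunique cidr)

-- ===== LEMMAS AND PROOFS =====

-- A's inner loop returns false iff some non-empty prefix of the remaining chars,
-- appended to the accumulator s, is an element of cidr different from x.
theorem cidruniqueInner_eq_false_iff (cidr : List String) (x : String) :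
    ∀ (l : List Char) (s : String),
      cidruniqueInner cidr x l s = false ↔
        ∃ t : List Char, t ≠ [] ∧ t <+: l ∧
          String.ofList (s.toList ++ t) ∈ cidr ∧ String.ofList (s.toList ++ t) ≠ x := by
  intro l
  induction l with
  | nil =>
    intro s
    simp only [cidruniqueInner]
    constructor
    · intro h; exact absurd h (by simp)
    · rintro ⟨t, htne, htp, -⟩
      exact absurd (List.prefix_nil.mp htp) htne
  | cons i rest ih =>
    intro s
    have hpush : s.push i = String.ofList (s.toList ++ [i]) := by
      rw [← String.toList_inj]; simp
    constructor
    · intro h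
      by_cases hc : s.push i ∈ cidr ∧ s.push i ≠ x
      · exact ⟨[i], by simp, ⟨rest, rfl⟩, by rw [← hpush]; exact hc.1, by rw [← hpush]; exact hc.2⟩
      · rw [cidruniqueInner, if_neg hc] at h
        rcases (ih (s.push i)).mp h with ⟨t, htne, htp, hmem, hne⟩
        rw [hpush] at hmem hne
        simp only [String.toList_ofList, List.append_assoc, List.singleton_append] at hmem hne
        exact ⟨i :: t, by simp, List.cons_prefix_cons.mpr ⟨rfl, htp⟩, hmem, hne⟩
    · rintro ⟨t, htne, htp, hmem, hne⟩
      rcases t with _ | ⟨j, t'⟩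
      · exact absurd rfl htne
      obtain ⟨hj, ht'⟩ := List.cons_prefix_cons.mp htp
      rw [hj] at hmem hne
      by_cases hc : s.push i ∈ cidr ∧ s.push i ≠ x
      · rw [cidruniqueInner, if_pos hc]
      · rw [cidruniqueInner, if_neg hc]
        rcases t' with _ | _
        · exact absurd ⟨by rw [hpush]; simpa using hmem, by rw [hpush]; simpa using hne⟩ hc
        · refine (ih (s.push i)).mpr ⟨_, by simp, ht', ?_, ?_⟩
          · rw [hpush]; simpa using hmem
          · rw [hpush]; simpa using hne

-- per-element: A's verdict equals the negation of B's any-scan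
theorem inner_eq_not_any (cidr : List String) (x : String) :
    cidruniqueInner cidr x x.toList "" =
      ! cidr.any (fun y => (y != x) && (y != "") && PySem.Str.startswith x y) := by
  have key : cidruniqueInner cidr x x.toList "" = false ↔
      cidr.any (fun y => (y != x) && (y != "") && PySem.Str.startswith x y) = true := by
    rw [cidruniqueInner_eq_false_iff cidr x x.toList "", List.any_eq_true]
    constructor
    · rintro ⟨t, htne, htp, hmem, hne⟩
      simp only [String.toList_empty, List.nil_append] at hmem hne
      refine ⟨String.ofList t, hmem, ?_⟩
      simp only [Bool.and_eq_true, bne_iff_ne, ne_eq]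
      refine ⟨⟨hne, ?_⟩, ?_⟩
      · rw [← String.toList_inj]; simpa using htne
      · rw [PySem.Str.startswith_eq]
        exact (PySem.Chars.startswith_iff _ _).mpr (by simpa using htp)
    · rintro ⟨y, hy, hprop⟩
      simp only [Bool.and_eq_true, bne_iff_ne, ne_eq] at hprop
      obtain ⟨⟨hynex, hyne⟩, hsw⟩ := hprop
      rw [PySem.Str.startswith_eq] at hsw
      have hpfx : y.toList <+: x.toList := (PySem.Chars.startswith_iff _ _).mp hsw
      refine ⟨y.toList, ?_, hpfx, ?_, ?_⟩
      · intro h; exact hyne (by rw [← String.toList_inj]; simpa using h)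
      · simpa using hy
      · simpa using hynex
  rcases hA : cidruniqueInner cidr x x.toList "" with _ | _
  · rw [(key.mp hA)]; rfl
  · rcases h2 : cidr.any (fun y => (y != x) && (y != "") && PySem.Str.startswith x y) with _ | _
    · rfl
    · rw [hA] at key; exact absurd (key.mpr h2) (by simp)

-- ===== VERDICT (by name: the statement is the Claim_ definition above) =====
theorem cidrunique_spec : Claim_equal_cidrunique := by
  intro cidr _
  unfold Spec_cidrunique cidrunique cidrunique_alt
  rw [PySem.List.foldl_append_if_eq_filter]
  simp only [List.nil_append]
  congr 2
  apply List.filter_congr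
  intro x _
  exact inner_eq_not_any cidr x
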